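-- pv_equiv track=rewrite | github.com/ever-ag/Brie-IT-Agent | sop-workflow-fix.py | get_sop_mapping
-- ===== SOURCE A (Python) =====
-- def get_sop_mapping(message):
--     """Check SOP mapping first"""
--     sop_mappings = {
--         'employees': 'All Ever.Ag Employees',
--         'all employees': 'All Ever.Ag Employees',
--         'usa employees': 'USA Employees',
--         'canada employees': 'Canada Employees',
--         'brazil employees': 'Brazil Employees'
--     }
--
--     for key, value in sop_mappings.items():
--         if key in message:
--             return value
--
--     return None
-- ===== SOURCE B (Python) =====
-- def get_sop_mapping(message):
--     """Check SOP mapping first"""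
--     # Every key of the original mapping contains 'employees' as a substring and
--     # 'employees' is checked first, so a single membership test decides the result.
--     return 'All Ever.Ag Employees' if 'employees' in message else None
-- ===== Notes on version B (the rewrite author's own statement) =====
-- stated objective: simpler
-- what changed: Replaced the dict and loop over five keys with a single substring test: 'employees' is a substring of every other key and is checked first, so only the first branch can ever fire.
import Mathlib
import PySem

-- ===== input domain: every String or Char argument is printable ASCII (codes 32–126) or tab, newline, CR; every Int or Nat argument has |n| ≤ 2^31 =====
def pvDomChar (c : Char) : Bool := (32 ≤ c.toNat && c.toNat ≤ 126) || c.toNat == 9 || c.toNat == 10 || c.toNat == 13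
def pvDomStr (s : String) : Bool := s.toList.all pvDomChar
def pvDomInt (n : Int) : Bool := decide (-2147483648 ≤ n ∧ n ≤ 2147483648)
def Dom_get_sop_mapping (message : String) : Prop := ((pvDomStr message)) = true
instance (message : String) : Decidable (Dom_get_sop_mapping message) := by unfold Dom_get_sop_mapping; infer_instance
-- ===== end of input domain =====

-- B replaces A's dict-and-loop with one substring test ('employees' is a substring of every key and is checked first): simpler, same result.

-- ===== PORT A =====
-- loop over dict items, returning the first value whose key is a substring of message
def getSopLoop (message : String) : List (String × String) → Option String
  | [] => none
  | (k, v) :: rest => if PySem.Str.isIn k message then some v else getSopLoop message rest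

def get_sop_mapping (message : String) : Option String :=
  let sop_mappings : PySem.Dict String String := PySem.Dict.ofList
    [("employees", "All Ever.Ag Employees"),
     ("all employees", "All Ever.Ag Employees"),
     ("usa employees", "USA Employees"),
     ("canada employees", "Canada Employees"),
     ("brazil employees", "Brazil Employees")]
  getSopLoop message sop_mappings.items

-- ===== PORT B =====
def get_sop_mapping_alt (message : String) : Option String :=
  if PySem.Str.isIn "employees" message then some "All Ever.Ag Employees" else none

-- ===== PRECONDITION & SPEC =====
def Spec_get_sop_mapping (message : String) (out : Option String) : Prop := out = get_sop_mapping_alt message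
instance (message : String) (out : Option String) : Decidable (Spec_get_sop_mapping message out) := by unfold Spec_get_sop_mapping; infer_instance

-- ===== CLAIM (what is proved, stated in full; the proofs are below) =====
def Claim_equal_get_sop_mapping : Prop := ∀ (message : String), Dom_get_sop_mapping message → Spec_get_sop_mapping message (get_sop_mapping message)

-- ===== LEMMAS AND PROOFS =====

-- if some key of A's mapping is a substring of message, so is "employees"
theorem employees_of_key (message k : String)
    (hk : "employees".toList <:+: k.toList)
    (h : PySem.Str.isIn k message = true) :
    PySem.Str.isIn "employees" message = true := by
  rw [PySem.Str.isIn_iff_infix] at h ⊢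
  exact hk.trans h

-- ===== VERDICT (by name: the statement is the Claim_ definition above) =====
theorem get_sop_mapping_spec : Claim_equal_get_sop_mapping := by
  intro message _
  unfold Spec_get_sop_mapping get_sop_mapping get_sop_mapping_alt
  have hitems : (PySem.Dict.ofList
      [("employees", "All Ever.Ag Employees"),
       ("all employees", "All Ever.Ag Employees"),
       ("usa employees", "USA Employees"),
       ("canada employees", "Canada Employees"),
       ("brazil employees", "Brazil Employees")] : PySem.Dict String String).items =
      [("employees", "All Ever.Ag Employees"),
       ("all employees", "All Ever.Ag Employees"),
       ("usa employees", "USA Employees"),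
       ("canada employees", "Canada Employees"),
       ("brazil employees", "Brazil Employees")] := by rfl
  show getSopLoop message _ = _
  rw [hitems]
  by_cases h : PySem.Str.isIn "employees" message = true
  · simp only [PySem.Str.isIn_eq] at h
    rw [show ("employees".toList) = ['e','m','p','l','o','y','e','e','s'] from rfl] at h
    simp [getSopLoop, h]
  · have hf : PySem.Str.isIn "employees" message = false := by
      cases hb : PySem.Str.isIn "employees" message
      · rfl
      · exact absurd hb h
    have h1 : PySem.Str.isIn "all employees" message = false := by
      cases hb : PySem.Str.isIn "all employees" message
      · rfl
      · exact absurd (employees_of_key message _ (by decide) hb) h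
    have h2 : PySem.Str.isIn "usa employees" message = false := by
      cases hb : PySem.Str.isIn "usa employees" message
      · rfl
      · exact absurd (employees_of_key message _ (by decide) hb) h
    have h3 : PySem.Str.isIn "canada employees" message = false := by
      cases hb : PySem.Str.isIn "canada employees" message
      · rfl
      · exact absurd (employees_of_key message _ (by decide) hb) h
    have h4 : PySem.Str.isIn "brazil employees" message = false := by
      cases hb : PySem.Str.isIn "brazil employees" message
      · rfl
      · exact absurd (employees_of_key message _ (by decide) hb) h
    simp only [PySem.Str.isIn_eq] at hf h1 h2 h3 h4
    rw [show ("employees".toList) = ['e','m','p','l','o','y','e','e','s'] from rfl] at hf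
    rw [show ("all employees".toList) = ['a','l','l',' ','e','m','p','l','o','y','e','e','s'] from rfl] at h1
    rw [show ("usa employees".toList) = ['u','s','a',' ','e','m','p','l','o','y','e','e','s'] from rfl] at h2
    rw [show ("canada employees".toList) = ['c','a','n','a','d','a',' ','e','m','p','l','o','y','e','e','s'] from rfl] at h3
    rw [show ("brazil employees".toList) = ['b','r','a','z','i','l',' ','e','m','p','l','o','y','e','e','s'] from rfl] at h4
    simp [getSopLoop, hf, h1, h2, h3, h4]
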